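-- pv_equiv track=rewrite | github.com/snowink1137/TIL | 00.SSAFY/1.first-semester/algorithm/programmers/kakao_2019/6_not_complete.py | solution
-- ===== SOURCE A (Python) =====
-- def solution(n, weak, dist):
--     answer = -1
--     dist.reverse()
--
--     interval = [weak[0]+n-weak[-1]]
--     for i in range(len(weak)-1):
--         interval.append(weak[i+1]-weak[i])
--
--     interval.sort(reverse=True)
--     interval.pop(0)
--
--     for i in range(len(dist)):
--         if sum(interval) <= sum(dist[:i+1]):
--             answer = i + 1
--             break
--         else:
--             interval.pop(0)
--
--     return answer
-- ===== SOURCE B (Python) =====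
-- def solution(n, weak, dist):
--     # Same in-place dist.reverse() side effect as the original; answer computed declaratively.
--     dist.reverse()
--     gaps = sorted([weak[0] + n - weak[-1]] + [b - a for a, b in zip(weak, weak[1:])])
--     gaps.pop()                      # discard the largest circular gap
--     L = len(gaps)
--     # pref[j] = total length of the j smallest gaps
--     pref = [0]
--     t = 0
--     for g in gaps:
--         t += g
--         pref.append(t)
--     # cum[i] = combined range of the first i+1 friends (dist reversed)
--     cum = []
--     t = 0
--     for d in dist:
--         t += d
--         cum.append(t)
--     # friend i+1 suffices iff the gaps not yet assigned (the L-i smallest) fit in cum[i]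
--     ok = [pref[max(L - i, 0)] <= c for i, c in enumerate(cum)]
--     return ok.index(True) + 1 if True in ok else -1
-- ===== Notes on version B (the rewrite author's own statement) =====
-- stated objective: alternative
-- what changed: A runs a destructive search loop that pops the head of a descending-sorted gap list and recomputes sum(interval) and sum(dist[:i+1]) from scratch each iteration; B has no search loop at all: it builds prefix-sum tables for the ascending gaps and the reversed dist, maps them to a boolean feasibility list, and returns list.index of the first True.
-- outside the precondition, e.g. on solution(10, [], [1]): A raises IndexError, B raises IndexError; on solution(10, [0, 3], [-1, -1, -1]): A raises IndexError, B returns -1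
import Mathlib
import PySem

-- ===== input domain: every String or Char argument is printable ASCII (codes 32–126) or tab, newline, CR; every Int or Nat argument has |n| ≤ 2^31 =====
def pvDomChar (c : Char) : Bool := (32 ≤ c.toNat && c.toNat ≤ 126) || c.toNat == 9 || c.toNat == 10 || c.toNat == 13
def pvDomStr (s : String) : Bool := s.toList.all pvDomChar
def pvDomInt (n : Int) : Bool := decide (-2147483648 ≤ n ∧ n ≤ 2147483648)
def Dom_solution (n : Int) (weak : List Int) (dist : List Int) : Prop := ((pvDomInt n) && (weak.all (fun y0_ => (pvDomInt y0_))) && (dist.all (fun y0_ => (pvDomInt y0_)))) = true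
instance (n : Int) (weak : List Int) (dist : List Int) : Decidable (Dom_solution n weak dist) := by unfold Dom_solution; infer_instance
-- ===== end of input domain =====

-- B drops A's destructive search loop (pop(0) on a descending gap list with sum() recomputed twice
-- per iteration) and instead stages the answer declaratively: prefix-sum tables for the ascending
-- gaps and the reversed dist, a boolean feasibility list, and list.index of the first True.
-- Both A and B reverse `dist` in place (identical side effect); the theorems are about the RETURN value.

-- ===== PORT A =====
-- A's second for-loop: structural recursion on the yet-unprocessed suffix of the reversed dist,
-- carrying the loop index i; each iteration recomputes sum(interval) and sum(dist[:i+1]) in full,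
-- exactly as A does.  interval.pop(0) raises IndexError on the empty list in Python — those runs
-- are excluded by Pre_solution; the port takes .tail there.
def solutionLoopA (dist : List Int) (interval : List Int) (i : Nat) : List Int → Int
  | [] => -1
  | _ :: rest =>
    if interval.sum ≤ (PySem.List.slice dist none (some ((i : Int) + 1))).sum then (i : Int) + 1
    else solutionLoopA dist interval.tail (i + 1) rest

def solution (n : Int) (weak : List Int) (dist : List Int) : Int :=
  let dist := dist.reverse
  -- weak[0] / weak[-1] raise IndexError on empty weak (excluded by Pre_solution; .getD 0 there)
  let interval : List Int :=
    [((PySem.List.pyGet? weak 0).getD 0) + n - ((PySem.List.pyGet? weak (-1)).getD 0)]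
  let interval :=
    (PySem.List.pyRange 0 ((weak.length : Int) - 1) 1).foldl
      (fun acc i => acc ++ [((PySem.List.pyGet? weak (i + 1)).getD 0) - ((PySem.List.pyGet? weak i).getD 0)])
      interval
  let interval := PySem.List.sorted interval (fun x => x) true
  let interval := interval.tail          -- interval.pop(0); the list is nonempty here
  solutionLoopA dist interval 0 dist

-- ===== PORT B =====
def solution_alt (n : Int) (weak : List Int) (dist : List Int) : Int :=
  let dist := dist.reverse
  let gaps : List Int :=
    PySem.List.sorted
      ((((PySem.List.pyGet? weak 0).getD 0) + n - ((PySem.List.pyGet? weak (-1)).getD 0)) ::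
        (weak.zip weak.tail).map (fun p => p.2 - p.1)) (fun x => x) false
  let gaps := gaps.dropLast            -- gaps.pop(): discard the largest circular gap
  let L := gaps.length
  -- pref[j] = total length of the j smallest gaps
  let pref := (gaps.foldl (fun (s : Int × List Int) g => (s.1 + g, s.2 ++ [s.1 + g])) (0, [0])).2
  -- cum[i] = combined range of the first i+1 friends (dist reversed)
  let cum := (dist.foldl (fun (s : Int × List Int) d => (s.1 + d, s.2 ++ [s.1 + d])) (0, [])).2
  let ok := (PySem.List.enumerate cum 0).map
    (fun p => decide ((PySem.List.pyGet? pref (max ((L : Int) - p.1) 0)).getD 0 ≤ p.2))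
  if ok.contains true then (((PySem.List.index? ok true).getD 0 : Nat) : Int) + 1 else -1

-- ===== PRECONDITION & SPEC =====
-- helper for Pre_ only: the sorted gap list with the largest gap removed (ascending order)
def pvPreIv (n : Int) (weak : List Int) : List Int :=
  (PySem.List.sorted
     ((((PySem.List.pyGet? weak 0).getD 0) + n - ((PySem.List.pyGet? weak (-1)).getD 0)) ::
       (weak.zip weak.tail).map (fun p => p.2 - p.1))
     (fun x => x) false).dropLast

-- Pre_ excludes exactly the inputs on which A raises IndexError: empty weak (weak[0]), and the
-- runs in which every loop iteration fails its coverage test until the gap list is exhausted, so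
-- that interval.pop(0) hits the empty list (reachable only through negative dist prefix sums).
-- On every input A returns on, Pre_solution holds.
def Pre_solution (n : Int) (weak : List Int) (dist : List Int) : Prop :=
  weak ≠ [] ∧
  (dist.length ≤ weak.length - 1 ∨
   0 ≤ (dist.reverse.take weak.length).sum ∨
   ((List.range (weak.length - 1)).any (fun j =>
      decide (((pvPreIv n weak).reverse.drop j).sum ≤ (dist.reverse.take (j + 1)).sum))) = true)
instance (n : Int) (weak : List Int) (dist : List Int) : Decidable (Pre_solution n weak dist) := by
  unfold Pre_solution; infer_instance

def pvWitness_solution : Int × List Int × List Int := (12, [1, 5, 6, 10], [1, 2, 3, 4])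

def Spec_solution (n : Int) (weak : List Int) (dist : List Int) (out : Int) : Prop := out = solution_alt n weak dist
instance (n : Int) (weak : List Int) (dist : List Int) (out : Int) : Decidable (Spec_solution n weak dist out) := by unfold Spec_solution; infer_instance

-- ===== CLAIM (what is proved, stated in full; the proofs are below) =====
def Claim_equal_solution : Prop := ∀ (n : Int) (weak : List Int) (dist : List Int), Dom_solution n weak dist → Pre_solution n weak dist → Spec_solution n weak dist (solution n weak dist)

-- ===== LEMMAS AND PROOFS =====

-- sorted(xs, reverse=True) on Ints with the identity key is the reverse of sorted(xs)
theorem sorted_rev_eq (xs : List Int) :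
    PySem.List.sorted xs (fun x => x) true = (PySem.List.sorted xs (fun x => x) false).reverse := by
  have hp : (PySem.List.sorted xs (fun x => x) true).Perm ((PySem.List.sorted xs (fun x => x) false).reverse) :=
    ((PySem.List.sorted_perm xs (fun x => x) true)).trans
      (((PySem.List.sorted_perm xs (fun x => x) false)).symm.trans (List.reverse_perm _).symm)
  have h1 := PySem.List.sorted_pairwise_rev xs (fun x => x)
  have h2 : ((PySem.List.sorted xs (fun x => x) false).reverse).Pairwise (fun a b : Int => b ≤ a) := by
    rw [List.pairwise_reverse]
    exact PySem.List.sorted_pairwise xs (fun x => x)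
  exact List.Perm.eq_of_pairwise (fun a b _ _ hab hba => le_antisymm hba hab) h1 h2 hp

-- the gap comprehension over range(len(weak)-1) is the zip-with-tail difference list
theorem gaps_eq (l : List Int) :
    (List.range (l.length - 1)).map (fun (j : Nat) => (PySem.List.pyGet? l ((j : Int) + 1)).getD 0
        - (PySem.List.pyGet? l ((j : Int))).getD 0)
      = (l.zip l.tail).map (fun p => p.2 - p.1) := by
  apply List.ext_getElem
  · simp [List.length_zip]
  · intro i h1 h2
    simp only [List.getElem_map, List.getElem_range, List.getElem_zip]
    have hi : i < l.length - 1 := by simpa using h1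
    have e1 : ((i : Int) + 1) = (((i + 1 : Nat)) : Int) := by push_cast; ring
    rw [e1, PySem.List.pyGet?_natCast, PySem.List.pyGet?_natCast]
    have h3 : i + 1 < l.length := by omega
    have h4 : i < l.length := by omega
    simp [List.getElem?_eq_getElem h3, List.getElem?_eq_getElem h4, List.getElem_tail]

-- A's append-fold over pyRange builds the head-cons-gaps list B writes directly
theorem rawA_eq (l : List Int) (h0 : Int) (hl : l ≠ []) :
    (PySem.List.pyRange 0 ((l.length : Int) - 1) 1).foldl
      (fun acc i => acc ++ [(PySem.List.pyGet? l (i + 1)).getD 0 - (PySem.List.pyGet? l i).getD 0]) [h0]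
      = h0 :: (l.zip l.tail).map (fun p => p.2 - p.1) := by
  rw [PySem.List.foldl_append_singleton_eq_map]
  have e : ((l.length : Int) - 1) = ((l.length - 1 : Nat) : Int) := by
    have : 1 ≤ l.length := List.length_pos_iff.mpr hl
    omega
  rw [e, PySem.List.pyRange_zero_natCast, List.map_map, ← gaps_eq l]
  rfl

-- B's running-total fold builds the value-prefix-sum table
theorem prefFold (gs : List Int) (t : Int) (p : List Int) :
    gs.foldl (fun (s : Int × List Int) g => (s.1 + g, s.2 ++ [s.1 + g])) (t, p)
      = (t + gs.sum, p ++ (List.range gs.length).map (fun j => t + (gs.take (j + 1)).sum)) := by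
  induction gs generalizing t p with
  | nil => simp
  | cons g gs ih =>
    simp only [List.foldl_cons, ih (t + g) (p ++ [t + g]), List.length_cons,
      List.range_succ_eq_map, List.map_cons, List.map_map, List.append_assoc,
      List.singleton_append, List.sum_cons, List.take_succ_cons, Prod.mk.injEq]
    refine ⟨by ring, ?_⟩
    congr 1
    refine List.cons_eq_cons.mpr ⟨by simp, ?_⟩
    apply List.map_congr_left
    intro j _
    simp
    ring

-- the per-index feasibility condition shared by both programs
def pvOk (D G : List Int) : List Bool :=
  (List.range D.length).map (fun i =>
    decide ((G.take (G.length - i)).sum ≤ (D.take (i + 1)).sum))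

-- A's loop from step k is the index?-search over the tail of the feasibility list
theorem loopA_eq (D G : List Int) :
    ∀ (rest : List Int) (k : Nat), rest = D.drop k →
      solutionLoopA D (G.reverse.drop k) k rest
        = (match PySem.List.index? ((pvOk D G).drop k) true with
           | some j => ((k + j : Nat) : Int) + 1
           | none => -1) := by
  intro rest
  induction rest with
  | nil =>
    intro k hk
    have hlen : D.length ≤ k := List.drop_eq_nil_iff.mp hk.symm
    have : (pvOk D G).drop k = [] := by
      apply List.drop_eq_nil_of_le; simp [pvOk]; omega
    simp [solutionLoopA, this, PySem.List.index?]
  | cons d rest ih =>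
    intro k hk
    have hkD : k < D.length := by
      by_contra h
      rw [List.drop_eq_nil_of_le (by omega)] at hk
      exact (List.cons_ne_nil d rest) hk
    have hcons := List.drop_eq_getElem_cons hkD
    rw [← hk] at hcons
    have hrest : rest = D.drop (k + 1) := (List.cons.injEq _ _ _ _ ▸ hcons).2
    -- the compared sums are the same on both sides
    have hsumiv : (G.reverse.drop k).sum = (G.take (G.length - k)).sum := by
      rw [List.drop_reverse, List.sum_reverse]
    have econd : (PySem.List.slice D none (some ((k : Int) + 1))).sum = (D.take (k + 1)).sum := by
      have e1 : ((k : Int) + 1) = (((k + 1 : Nat)) : Int) := by push_cast; ring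
      rw [e1, PySem.List.slice_to_natCast]
    have hokk : k < (pvOk D G).length := by simp [pvOk]; omega
    have hdropok := List.drop_eq_getElem_cons hokk
    have hget : (pvOk D G)[k] = decide ((G.take (G.length - k)).sum ≤ (D.take (k + 1)).sum) := by
      simp [pvOk]
    simp only [solutionLoopA, econd, hsumiv]
    rw [hdropok, hget]
    by_cases hc : (G.take (G.length - k)).sum ≤ (D.take (k + 1)).sum
    · rw [if_pos hc, decide_eq_true hc, PySem.List.index?_cons_self]
      simp
    · rw [if_neg hc, decide_eq_false hc]
      have et : (G.reverse.drop k).tail = G.reverse.drop (k + 1) := List.tail_drop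
      rw [et, ih (k + 1) hrest]
      have hne : (false : Bool) ≠ true := by decide
      rw [PySem.List.index?_cons_of_ne _ hne]
      cases PySem.List.index? ((pvOk D G).drop (k + 1)) true with
      | none => simp
      | some j =>
        simp only [Option.map_some]
        congr 1
        push_cast
        ring

-- the value-prefix-sum table reads back prefix sums
theorem pref_get (G : List Int) (k : Nat) (hk : k ≤ G.length) :
    (PySem.List.pyGet? ([0] ++ (List.range G.length).map (fun j => (0 : Int) + (G.take (j + 1)).sum))
       ((k : Nat) : Int)).getD 0 = (G.take k).sum := by
  rw [PySem.List.pyGet?_natCast]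
  cases k with
  | zero => simp
  | succ j =>
    have hj : j < G.length := by omega
    have hlen : j + 1 < ([0] ++ (List.range G.length).map (fun j => (0 : Int) + (G.take (j + 1)).sum)).length := by
      simp; omega
    rw [List.getElem?_eq_getElem hlen, Option.getD_some]
    simp [hj]

-- element i of list(enumerate(xs, s)) is (s + i, xs[i])
theorem enum_get? {α : Type} (xs : List α) (s : Int) (i : Nat) (h : i < xs.length) :
    (PySem.List.enumerate xs s)[i]? = some (s + (i : Int), xs[i]) := by
  induction xs generalizing s i with
  | nil => simp at h
  | cons x xs ih =>
    rw [PySem.List.enumerate_cons]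
    cases i with
    | zero => simp
    | succ j =>
      have hj : j < xs.length := by simpa using h
      rw [List.getElem?_cons_succ, ih (s + 1) j hj]
      simp only [List.getElem_cons_succ, Option.some.injEq, Prod.mk.injEq]
      refine ⟨by push_cast; ring, by simp⟩

-- B's feasibility list is pvOk
theorem okB_eq (D G : List Int) :
    (PySem.List.enumerate ((List.range D.length).map (fun i => (0 : Int) + (D.take (i + 1)).sum)) 0).map
      (fun p => decide ((PySem.List.pyGet? ([0] ++ (List.range G.length).map (fun j => (0 : Int) + (G.take (j + 1)).sum))
          (max ((G.length : Int) - p.1) 0)).getD 0 ≤ p.2))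
      = pvOk D G := by
  apply List.ext_getElem
  · simp [pvOk, PySem.List.length_enumerate]
  · intro i h1 h2
    have hiD : i < D.length := by simpa [PySem.List.length_enumerate] using h1
    have hic : i < ((List.range D.length).map (fun i => (0 : Int) + (D.take (i + 1)).sum)).length := by
      simpa using hiD
    have hlen : i < (PySem.List.enumerate ((List.range D.length).map (fun i => (0 : Int) + (D.take (i + 1)).sum)) 0).length := by
      rw [PySem.List.length_enumerate]; exact hic
    have hen : (PySem.List.enumerate ((List.range D.length).map (fun i => (0 : Int) + (D.take (i + 1)).sum)) 0)[i]
        = ((0 : Int) + (i : Int), (0 : Int) + (D.take (i + 1)).sum) := by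
      have h' := enum_get? ((List.range D.length).map (fun i => (0 : Int) + (D.take (i + 1)).sum)) 0 i hic
      rw [List.getElem?_eq_getElem hlen] at h'
      have := Option.some.inj h'
      rw [this]
      simp [hiD]
    simp only [List.getElem_map, hen, pvOk, List.getElem_range]
    have emax : max ((G.length : Int) - ((0 : Int) + (i : Int))) 0 = (((G.length - i : Nat)) : Int) := by omega
    rw [emax, pref_get G (G.length - i) (by omega)]
    simp

-- ===== VERDICT (by name: the statement is the Claim_ definition above) =====
theorem solution_spec : Claim_equal_solution := by
  intro n weak dist _ hpre
  obtain ⟨hw, _⟩ := hpre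
  unfold Spec_solution
  simp only [solution, solution_alt]
  rw [rawA_eq weak _ hw, sorted_rev_eq, List.tail_reverse]
  simp only [prefFold, List.nil_append]
  set D := dist.reverse with hD
  set G := (PySem.List.sorted
      ((((PySem.List.pyGet? weak 0).getD 0) + n - ((PySem.List.pyGet? weak (-1)).getD 0)) ::
        (weak.zip weak.tail).map (fun p => p.2 - p.1)) (fun x => x) false).dropLast with hG
  rw [okB_eq D G]
  have hA := loopA_eq D G D 0 (by simp)
  simp only [List.drop_zero, Nat.zero_add] at hA
  rw [hA]
  rcases hidx : PySem.List.index? (pvOk D G) true with _ | j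
  · have hnm : true ∉ pvOk D G := (PySem.List.index?_eq_none_iff _ _).mp hidx
    simp [List.contains_eq_mem, hnm]
  · have hmem : true ∈ pvOk D G := (PySem.List.index?_isSome_iff _ _).mp (by rw [hidx]; rfl)
    simp [List.contains_eq_mem, hmem]
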